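-- pv_equiv track=rewrite | github.com/TRAN-VAN-DUY/Python | tongchuso_tichchuso.py | tich
-- ===== SOURCE A (Python) =====
-- def check(n):
--     m=0
--     for i in range(1,len(n),2):
--         if(n[i]=='0'):
--             m+=1
--     if(m!=len(n)//2): return False
--     return True
--
-- def tich(n):
--     m=1
--     if(check(n)): m=0
--     else:
--         for i in range(1,len(n),2):
--             if(n[i]!='0'):
--                 m*=int(n[i])
--     return m
-- ===== SOURCE B (Python) =====
-- def tich(n):
--     m = 1
--     found = False
--     for i in range(1, len(n), 2):
--         if n[i] != '0':
--             m *= int(n[i])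
--             found = True
--     return m if found else 0
-- ===== Notes on version B (the rewrite author's own statement) =====
-- stated objective: simpler
-- what changed: Replaces A's two scans (a 'check' helper counting '0's at odd indices against len//2, then a separate product loop) with a single pass keeping a (product, found) accumulator and returning product if found else 0; the helper disappears.
import Mathlib
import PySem

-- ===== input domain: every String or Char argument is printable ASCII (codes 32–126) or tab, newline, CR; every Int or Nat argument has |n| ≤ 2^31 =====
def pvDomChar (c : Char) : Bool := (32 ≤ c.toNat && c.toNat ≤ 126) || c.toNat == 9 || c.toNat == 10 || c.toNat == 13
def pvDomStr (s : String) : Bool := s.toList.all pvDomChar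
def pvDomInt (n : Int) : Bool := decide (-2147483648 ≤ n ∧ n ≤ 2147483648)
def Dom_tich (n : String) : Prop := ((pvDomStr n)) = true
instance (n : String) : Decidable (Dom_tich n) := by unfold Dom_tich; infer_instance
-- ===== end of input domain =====

-- B merges A's all-zero detection helper and A's product loop into ONE pass keeping
-- (product, found) — simpler: no helper function, one scan instead of two.

-- int(c) for a single character, as both Pythons apply it (under Pre_ it is a digit)
def pvCharInt (c : Char) : Int := (PySem.Int.ofStr? (String.ofList [c])).getD 0

-- ===== PORT A =====
-- helper 'check': counts '0's at odd indices, compares with len(n)//2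
def tich_check (n : String) : Bool :=
  let cs := n.toList
  let m : Int := (PySem.List.pyRange 1 (cs.length : Int) 2).foldl
      (fun m i => if PySem.List.pyGetD cs i ' ' = '0' then m + 1 else m) 0
  if m ≠ PySem.Int.floordiv (cs.length : Int) 2 then false else true

def tich (n : String) : Int :=
  let cs := n.toList
  if tich_check n then 0
  else
    (PySem.List.pyRange 1 (cs.length : Int) 2).foldl
      (fun m i =>
        if PySem.List.pyGetD cs i ' ' ≠ '0' then m * pvCharInt (PySem.List.pyGetD cs i ' ')
        else m) 1

-- ===== PORT B =====
def tich_alt (n : String) : Int :=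
  let cs := n.toList
  let r : Int × Bool := (PySem.List.pyRange 1 (cs.length : Int) 2).foldl
      (fun p i =>
        if PySem.List.pyGetD cs i ' ' ≠ '0' then (p.1 * pvCharInt (PySem.List.pyGetD cs i ' '), true)
        else p) (1, false)
  if r.2 then r.1 else 0

-- ===== PRECONDITION & SPEC =====
-- Pre_ excludes exactly the inputs on which Python A raises ValueError:
-- a non-digit character at some odd index (there int(n[i]) fails).
def Pre_tich (n : String) : Prop :=
  ∀ p ∈ PySem.List.enumerate n.toList 0, p.1 % 2 = 1 → p.2.isDigit = true
instance (n : String) : Decidable (Pre_tich n) := by unfold Pre_tich; infer_instance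

def pvWitness_tich : String := "13"

def Spec_tich (n : String) (out : Int) : Prop := out = tich_alt n
instance (n : String) (out : Int) : Decidable (Spec_tich n out) := by unfold Spec_tich; infer_instance

-- ===== CLAIM (what is proved, stated in full; the proofs are below) =====
def Claim_equal_tich : Prop := ∀ (n : String), Dom_tich n → Pre_tich n → Spec_tich n (tich n)

-- ===== LEMMAS AND PROOFS =====

-- B's fold, with the flag/accumulator generalized: product fold plus "some nonzero seen"
theorem pv_foldB (g : Int → Char) (L : List Int) (m : Int) (f : Bool) :
    L.foldl (fun p i => if g i ≠ '0' then (p.1 * pvCharInt (g i), true) else p) (m, f)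
      = (L.foldl (fun m i => if g i ≠ '0' then m * pvCharInt (g i) else m) m,
         f || L.any (fun i => g i ≠ '0')) := by
  induction L generalizing m f with
  | nil => simp
  | cons a t ih =>
    rw [List.foldl_cons, List.foldl_cons, List.any_cons]
    by_cases h : g a = '0'
    · rw [if_neg (by simp [h]), if_neg (by simp [h]), ih]
      simp [h]
    · rw [if_pos h, if_pos h, ih]
      simp [h]

-- A's counting fold is countP
theorem pv_foldCount (g : Int → Char) (L : List Int) (m : Int) :
    L.foldl (fun m i => if g i = '0' then m + 1 else m) m
      = m + (L.countP (fun i => g i == '0') : Int) := by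
  induction L generalizing m with
  | nil => simp
  | cons a t ih =>
    rw [List.foldl_cons, List.countP_cons]
    by_cases h : g a = '0'
    · rw [if_pos h, ih]
      simp [h]; ring
    · rw [if_neg h, ih]
      simp [h]

-- length of the odd-index range range(1, len, 2) is len // 2
theorem pv_len_range (len : Nat) :
    ((PySem.List.pyRange 1 (len : Int) 2).length : Int)
      = PySem.Int.floordiv (len : Int) 2 := by
  rw [PySem.List.pyRange_of_pos 1 (len : Int) (by norm_num),
      PySem.Int.floordiv_eq_ediv_of_pos (by norm_num)]
  simp only [List.length_map, List.length_range]
  split_ifs with h <;> omega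

-- the whole equivalence, over an arbitrary index list and char-at-index function
theorem pv_main (g : Int → Char) (L : List Int) (flen : Int)
    (hlen : ((L.length : Nat) : Int) = flen) :
    (if (if L.foldl (fun m i => if g i = '0' then m + 1 else m) (0 : Int) ≠ flen
          then false else true) = true
     then (0 : Int)
     else L.foldl (fun m i => if g i ≠ '0' then m * pvCharInt (g i) else m) 1)
    = (let r := L.foldl (fun (p : Int × Bool) i =>
          if g i ≠ '0' then (p.1 * pvCharInt (g i), true) else p) (1, false);
       if r.2 then r.1 else 0) := by
  simp only [pv_foldB, pv_foldCount, zero_add]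
  by_cases hall : ∀ i ∈ L, (g i == '0') = true
  · have h0 : L.countP (fun i => g i == '0') = L.length :=
      List.countP_eq_length.mpr hall
    have h1 : ((L.countP (fun i => g i == '0') : Nat) : Int) = flen := by
      rw [h0]; exact hlen
    have hany : (L.any fun i => decide (g i ≠ '0')) = false := by
      simp only [List.any_eq_false]
      intro i hi
      simpa using hall i hi
    simp only [h1, hany]
    simp
  · have h0 : L.countP (fun i => g i == '0') ≠ L.length :=
      fun h => hall (List.countP_eq_length.mp h)
    have hle : L.countP (fun i => g i == '0') ≤ L.length := List.countP_le_length
    have h1 : ((L.countP (fun i => g i == '0') : Nat) : Int) ≠ flen := by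
      rw [← hlen]; omega
    have hany : (L.any fun i => decide (g i ≠ '0')) = true := by
      rw [List.any_eq_true]
      obtain ⟨i, hi, hne⟩ : ∃ i ∈ L, ¬(g i == '0') = true := by simpa using hall
      exact ⟨i, hi, by simpa using hne⟩
    simp only [hany]
    simp [h1]

theorem tich_spec_aux (n : String) : Spec_tich n (tich n) := by
  unfold Spec_tich tich tich_alt tich_check
  exact pv_main (fun i => PySem.List.pyGetD n.toList i ' ')
    (PySem.List.pyRange 1 (n.toList.length : Int) 2)
    (PySem.Int.floordiv (n.toList.length : Int) 2)
    (pv_len_range n.toList.length)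

-- ===== VERDICT (by name: the statement is the Claim_ definition above) =====
theorem tich_spec : Claim_equal_tich := by
  intro n _ _
  exact tich_spec_aux n
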